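-- pv_equiv track=rewrite | github.com/Fauthog/Conveyor | controller/alpha5.py | hex_groups_to_dec
-- ===== SOURCE A (Python) =====
-- def hex_groups_to_dec(hex_groups):
--     if len(hex_groups) != 4 or any(not (0 <= x < 256) for x in hex_groups):
--         raise ValueError("Input must be a list of 4 integers between 0 and 255.")
--
--     # Combine the hex groups into a single 32-bit hexadecimal string
--     hex_number = ''.join(f"{x:02X}" for x in hex_groups)
--
--     # Convert the hex string to a decimal number
--     number = int(hex_number, 16)
--
--     # Check if the number is in the range of a 32-bit signed integer
--     if number >= (1 << 31):
--         number -= (1 << 32)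
--
--     return number
-- ===== SOURCE B (Python) =====
-- def hex_groups_to_dec(hex_groups):
--     if len(hex_groups) != 4 or any(not (0 <= x < 256) for x in hex_groups):
--         raise ValueError("Input must be a list of 4 integers between 0 and 255.")
--     # Reinterpret the four validated bytes as a big-endian signed 32-bit int.
--     return int.from_bytes(bytes(hex_groups), 'big', signed=True)
-- ===== Notes on version B (the rewrite author's own statement) =====
-- stated objective: idiomatic
-- what changed: B keeps the identical validation guard but replaces the hex-string formatting + int(...,16) parse + manual sign subtraction with a single int.from_bytes(bytes(hex_groups), 'big', signed=True) that reads the four bytes directly as a big-endian signed 32-bit integer.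
import Mathlib
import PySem

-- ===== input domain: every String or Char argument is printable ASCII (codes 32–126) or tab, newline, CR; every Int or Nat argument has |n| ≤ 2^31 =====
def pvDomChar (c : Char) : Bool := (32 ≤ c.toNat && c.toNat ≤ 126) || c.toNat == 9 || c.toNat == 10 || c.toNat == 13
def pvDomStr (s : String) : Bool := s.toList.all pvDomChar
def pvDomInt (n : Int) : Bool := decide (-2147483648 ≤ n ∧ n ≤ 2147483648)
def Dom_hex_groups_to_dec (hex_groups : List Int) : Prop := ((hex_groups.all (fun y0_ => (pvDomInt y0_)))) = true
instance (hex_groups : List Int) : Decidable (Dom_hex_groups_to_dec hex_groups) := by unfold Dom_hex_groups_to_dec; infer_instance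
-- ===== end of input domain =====

-- B replaces A's hex-string build + base-16 parse + manual sign subtraction by reading the four
-- validated bytes directly as one big-endian signed 32-bit integer (int.from_bytes); idiomatic, same cost.

-- ===== PORT A =====
-- f"{x:02X}": two uppercase hex digits; exact for 0 ≤ x < 256 (the only values reaching it under Pre_)
def pvHexDigit (n : Int) : Char :=
  if n < 10 then Char.ofNat (48 + n.toNat) else Char.ofNat (55 + n.toNat)

def pvFmt02X (x : Int) : List Char := [pvHexDigit (x / 16), pvHexDigit (x % 16)]

-- int(s, 16): hand-ported base-16 parse; exact on the uppercase hex strings A's join produces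
def pvHexVal (c : Char) : Int :=
  if 65 ≤ c.toNat then (c.toNat : Int) - 55 else (c.toNat : Int) - 48

def hex_groups_to_dec (hex_groups : List Int) : Int :=
  -- on the guard Python raises ValueError; Pre_ excludes those inputs, the port returns 0 there
  if hex_groups.length ≠ 4 ∨ hex_groups.any (fun x => !(decide (0 ≤ x ∧ x < 256))) then 0
  else
    let chars := (hex_groups.map pvFmt02X).flatten
    let number := chars.foldl (fun acc c => 16 * acc + pvHexVal c) 0
    if number ≥ 2 ^ 31 then number - 2 ^ 32 else number

-- ===== PORT B =====
-- int.from_bytes(bytes(hex_groups), 'big', signed=True): big-endian byte accumulation with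
-- two's-complement sign interpretation of the top bit
def hex_groups_to_dec_alt (hex_groups : List Int) : Int :=
  if hex_groups.length ≠ 4 ∨ hex_groups.any (fun x => !(decide (0 ≤ x ∧ x < 256))) then 0
  else
    let u := hex_groups.foldl (fun acc x => 256 * acc + x) 0
    if u ≥ 2 ^ 31 then u - 2 ^ 32 else u

-- ===== PRECONDITION & SPEC =====
-- Pre_: exactly the inputs on which Python A returns (otherwise it raises ValueError)
def Pre_hex_groups_to_dec (hex_groups : List Int) : Prop :=
  hex_groups.length = 4 ∧ ∀ x ∈ hex_groups, 0 ≤ x ∧ x < 256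
instance (hex_groups : List Int) : Decidable (Pre_hex_groups_to_dec hex_groups) := by
  unfold Pre_hex_groups_to_dec; infer_instance

def pvWitness_hex_groups_to_dec : List Int := [255, 0, 16, 7]

def Spec_hex_groups_to_dec (hex_groups : List Int) (out : Int) : Prop := out = hex_groups_to_dec_alt hex_groups
instance (hex_groups : List Int) (out : Int) : Decidable (Spec_hex_groups_to_dec hex_groups out) := by unfold Spec_hex_groups_to_dec; infer_instance

-- ===== CLAIM (what is proved, stated in full; the proofs are below) =====
def Claim_equal_hex_groups_to_dec : Prop := ∀ (hex_groups : List Int), Dom_hex_groups_to_dec hex_groups → Pre_hex_groups_to_dec hex_groups → Spec_hex_groups_to_dec hex_groups (hex_groups_to_dec hex_groups)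

-- ===== LEMMAS AND PROOFS =====
theorem pvHexVal_pvHexDigit (n : Int) (h0 : 0 ≤ n) (h1 : n < 16) :
    pvHexVal (pvHexDigit n) = n := by
  interval_cases n <;> decide

-- parsing the two-digit hex rendering of a byte extends the accumulator by that byte
theorem pvFmt02X_fold (acc x : Int) (h0 : 0 ≤ x) (h1 : x < 256) :
    (pvFmt02X x).foldl (fun a c => 16 * a + pvHexVal c) acc = 256 * acc + x := by
  have hd : x / 16 = (x / 16 : Int) := rfl
  have q0 : 0 ≤ x / 16 := by positivity
  have q1 : x / 16 < 16 := by omega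
  have r0 : 0 ≤ x % 16 := Int.emod_nonneg x (by norm_num)
  have r1 : x % 16 < 16 := Int.emod_lt_of_pos x (by norm_num)
  simp only [pvFmt02X, List.foldl_cons, List.foldl_nil,
    pvHexVal_pvHexDigit _ q0 q1, pvHexVal_pvHexDigit _ r0 r1]
  omega

theorem hex_groups_to_dec_spec : Claim_equal_hex_groups_to_dec := by
  intro hex_groups _ hpre
  obtain ⟨hlen, hrange⟩ := hpre
  -- the list has exactly four elements
  obtain ⟨a, b, c, d, rfl⟩ : ∃ a b c d, hex_groups = [a, b, c, d] := by
    match hex_groups, hlen with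
    | [a, b, c, d], _ => exact ⟨a, b, c, d, rfl⟩
  have ha := hrange a (by simp)
  have hb := hrange b (by simp)
  have hc := hrange c (by simp)
  have hd := hrange d (by simp)
  have hguard : ¬ (([a, b, c, d] : List Int).length ≠ 4 ∨
      ([a, b, c, d] : List Int).any (fun x => !(decide (0 ≤ x ∧ x < 256)))) := by
    simp; omega
  unfold Spec_hex_groups_to_dec hex_groups_to_dec hex_groups_to_dec_alt
  rw [if_neg hguard, if_neg hguard]
  have key : ((([a, b, c, d] : List Int).map pvFmt02X).flatten).foldl
      (fun acc ch => 16 * acc + pvHexVal ch) 0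
      = ([a, b, c, d] : List Int).foldl (fun acc x => 256 * acc + x) 0 := by
    simp only [List.map_cons, List.map_nil, List.flatten_cons, List.flatten_nil,
      List.append_nil, List.foldl_append, List.foldl_cons, List.foldl_nil]
    rw [pvFmt02X_fold _ a ha.1 ha.2, pvFmt02X_fold _ b hb.1 hb.2,
      pvFmt02X_fold _ c hc.1 hc.2, pvFmt02X_fold _ d hd.1 hd.2]
  simp only [key]
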